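-- pv_equiv track=rewrite | github.com/jaeyoungchang5/interview-practice | interview-imc-fulltime/knights.py | find_invalid_spaces
-- ===== SOURCE A (Python) =====
-- def find_invalid_spaces(n, row, col):
--     # initialize table to all True
--     can_move = [([True] * (n)) for _ in range(n)]
--
--     # mark diagonals of bishop as FALSE (check params)
--     for i in range(n):
--         if row + i < n and col + i < n:
--             can_move[row+i][col+i] = False
--
--         if row - i >= 0 and col - i >= 0:
--             can_move[row-i][col-i] = False
--
--         if row+i < n and col-i >= 0:
--             can_move[row+i][col-i] = False
--
--         if row-i >= 0 and col+i < n: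
--             can_move[row-i][col+i] = False
--
--     # return table
--     return can_move
-- ===== SOURCE B (Python) =====
-- def find_invalid_spaces(n, row, col):
--     return [[abs(i - row) != abs(j - col) for j in range(n)] for i in range(n)]
-- ===== Notes on version B (the rewrite author's own statement) =====
-- stated objective: simpler
-- what changed: Replaces the four diagonal-walking update loops over a mutable grid with a single per-cell membership test abs(i-row) != abs(j-col) in a nested comprehension.
-- outside the precondition, e.g. on find_invalid_spaces(2, -1, 0): A returns [[True, False], [False, True]], B returns [[True, False], [True, True]]; on find_invalid_spaces(2, 2, 0): A raises IndexError, B returns [[True, True], [True, False]]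
import Mathlib
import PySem

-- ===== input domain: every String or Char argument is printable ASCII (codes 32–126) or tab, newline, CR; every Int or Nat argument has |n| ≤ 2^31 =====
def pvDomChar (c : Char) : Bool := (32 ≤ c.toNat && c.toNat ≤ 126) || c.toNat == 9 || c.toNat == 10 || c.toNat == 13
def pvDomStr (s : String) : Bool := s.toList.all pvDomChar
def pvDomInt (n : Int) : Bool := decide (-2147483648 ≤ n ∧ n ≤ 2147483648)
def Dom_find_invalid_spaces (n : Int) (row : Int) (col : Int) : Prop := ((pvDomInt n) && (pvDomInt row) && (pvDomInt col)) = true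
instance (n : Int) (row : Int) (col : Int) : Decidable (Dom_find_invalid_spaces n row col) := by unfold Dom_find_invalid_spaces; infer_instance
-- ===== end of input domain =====

-- B replaces A's four diagonal-walking update loops with one per-cell test abs(i-row) != abs(j-col); objective: simpler.

-- ===== PORT A =====
-- Python list assignment xs[i] = v with Python's negative-index rule; out of range it is the
-- identity (Python raises IndexError there — such inputs are outside Pre_).
def pyListSet (xs : List Bool) (i : Int) (v : Bool) : List Bool :=
  let j : Int := if i < 0 then i + xs.length else i
  if 0 ≤ j ∧ j < xs.length then xs.set j.toNat v else xs

-- Python `g[r][c] = v`: fetch row r (negative-index rule) and assign at column c.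
def gridSet (g : List (List Bool)) (r c : Int) (v : Bool) : List (List Bool) :=
  let j : Int := if r < 0 then r + g.length else r
  if 0 ≤ j ∧ j < g.length then g.set j.toNat (pyListSet (g.getD j.toNat []) c v) else g

def find_invalid_spaces (n : Int) (row : Int) (col : Int) : List (List Bool) :=
  let can_move := (PySem.List.pyRange 0 n 1).map (fun _ => List.replicate n.toNat true)
  (PySem.List.pyRange 0 n 1).foldl (fun g i =>
    let g := if row + i < n ∧ col + i < n then gridSet g (row + i) (col + i) false else g
    let g := if row - i ≥ 0 ∧ col - i ≥ 0 then gridSet g (row - i) (col - i) false else g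
    let g := if row + i < n ∧ col - i ≥ 0 then gridSet g (row + i) (col - i) false else g
    let g := if row - i ≥ 0 ∧ col + i < n then gridSet g (row - i) (col + i) false else g
    g) can_move

-- ===== PORT B =====
def find_invalid_spaces_alt (n : Int) (row : Int) (col : Int) : List (List Bool) :=
  (PySem.List.pyRange 0 n 1).map (fun i =>
    (PySem.List.pyRange 0 n 1).map (fun j => (i - row).natAbs != (j - col).natAbs))

-- ===== PRECONDITION & SPEC =====
-- Pre_ excludes out-of-range row/col (for n > 0): there A either raises IndexError or Python's
-- negative indexing silently wraps and marks a different cell set than any bishop diagonal.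
def Pre_find_invalid_spaces (n : Int) (row : Int) (col : Int) : Prop :=
  n ≤ 0 ∨ (0 ≤ row ∧ row < n ∧ 0 ≤ col ∧ col < n)
instance (n : Int) (row : Int) (col : Int) : Decidable (Pre_find_invalid_spaces n row col) := by
  unfold Pre_find_invalid_spaces; infer_instance

def pvWitness_find_invalid_spaces : Int × Int × Int := (3, 1, 2)

def Spec_find_invalid_spaces (n : Int) (row : Int) (col : Int) (out : List (List Bool)) : Prop := out = find_invalid_spaces_alt n row col
instance (n : Int) (row : Int) (col : Int) (out : List (List Bool)) : Decidable (Spec_find_invalid_spaces n row col out) := by unfold Spec_find_invalid_spaces; infer_instance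

-- ===== CLAIM (what is proved, stated in full; the proofs are below) =====
def Claim_equal_find_invalid_spaces : Prop := ∀ (n : Int) (row : Int) (col : Int), Dom_find_invalid_spaces n row col → Pre_find_invalid_spaces n row col → Spec_find_invalid_spaces n row col (find_invalid_spaces n row col)

-- ===== LEMMAS AND PROOFS =====

-- A grid given by a cell function, over an N×N board.
def Gr (N : Nat) (f : Nat → Nat → Bool) : List (List Bool) :=
  (List.range N).map (fun a => (List.range N).map (f a))

theorem Gr_congr {N : Nat} {f g : Nat → Nat → Bool}
    (h : ∀ a b, a < N → b < N → f a b = g a b) : Gr N f = Gr N g := by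
  unfold Gr
  apply List.ext_getElem (by simp)
  intro a h1 h2
  simp only [List.getElem_map, List.getElem_range]
  apply List.ext_getElem (by simp)
  intro b h3 h4
  simp only [List.getElem_map, List.getElem_range] at *
  exact h a b (by simpa using h1) (by simpa using h3)

theorem gridSet_Gr {N : Nat} (f : Nat → Nat → Bool) (r c : Int)
    (hr0 : 0 ≤ r) (hrN : r < (N : Int)) (hc0 : 0 ≤ c) (hcN : c < (N : Int)) :
    gridSet (Gr N f) r c false
      = Gr N (fun a b => if (a : Int) = r ∧ (b : Int) = c then false else f a b) := by
  have hlen : (Gr N f).length = N := by simp [Gr]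
  simp only [gridSet, hlen]
  rw [if_neg (show ¬ r < 0 by omega)]
  rw [if_pos (show 0 ≤ r ∧ r < (N : Int) by omega)]
  apply List.ext_getElem (by simp [Gr])
  intro a h1 h2
  rw [List.getElem_set]
  have haN : a < N := by simpa [Gr] using h1
  by_cases hae : r.toNat = a
  · rw [if_pos hae]
    have hgd : (Gr N f).getD r.toNat [] = (List.range N).map (f a) := by
      rw [List.getD_eq_getElem _ _ (by rw [hlen]; omega)]
      simp only [Gr, List.getElem_map, List.getElem_range]
      rw [hae]
    rw [hgd]
    simp only [pyListSet, List.length_map, List.length_range]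
    rw [if_neg (show ¬ c < 0 by omega)]
    rw [if_pos (show 0 ≤ c ∧ c < (N : Int) by omega)]
    simp only [Gr, List.getElem_map, List.getElem_range]
    apply List.ext_getElem (by simp)
    intro b h3 h4
    rw [List.getElem_set]
    simp only [List.getElem_map, List.getElem_range]
    have hbN : b < N := by simpa using h3
    by_cases hbe : c.toNat = b
    · rw [if_pos hbe, if_pos (by constructor <;> omega)]
    · rw [if_neg hbe, if_neg (by omega)]
  · rw [if_neg hae]
    simp only [Gr, List.getElem_map, List.getElem_range]
    apply List.ext_getElem (by simp)
    intro b h3 h4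
    simp only [List.getElem_map, List.getElem_range]
    rw [if_neg (by omega)]

-- the cells branch i of A's loop sets, as a Boolean on grid coordinates
def hitb (row col i : Int) (a b : Nat) : Bool :=
  decide (((a : Int) = row + i ∧ (b : Int) = col + i) ∨
          ((a : Int) = row - i ∧ (b : Int) = col - i) ∨
          ((a : Int) = row + i ∧ (b : Int) = col - i) ∨
          ((a : Int) = row - i ∧ (b : Int) = col + i))

def stepA (n row col : Int) (g : List (List Bool)) (i : Int) : List (List Bool) :=
  let g := if row + i < n ∧ col + i < n then gridSet g (row + i) (col + i) false else g
  let g := if row - i ≥ 0 ∧ col - i ≥ 0 then gridSet g (row - i) (col - i) false else g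
  let g := if row + i < n ∧ col - i ≥ 0 then gridSet g (row + i) (col - i) false else g
  let g := if row - i ≥ 0 ∧ col + i < n then gridSet g (row - i) (col + i) false else g
  g

theorem condSet_Gr {N : Nat} (P : Prop) [Decidable P] (r c : Int) (f : Nat → Nat → Bool)
    (h : P → (0 ≤ r ∧ r < (N : Int) ∧ 0 ≤ c ∧ c < (N : Int))) :
    (if P then gridSet (Gr N f) r c false else Gr N f)
      = Gr N (fun a b => if P ∧ (a : Int) = r ∧ (b : Int) = c then false else f a b) := by
  split_ifs with hp
  · rw [gridSet_Gr f r c (h hp).1 (h hp).2.1 (h hp).2.2.1 (h hp).2.2.2]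
    exact Gr_congr (fun a b _ _ => by simp [hp])
  · exact (Gr_congr (fun a b _ _ => by simp [hp])).symm

theorem stepA_Gr (n row col : Int) (hn : 0 < n) (hr : 0 ≤ row ∧ row < n) (hc : 0 ≤ col ∧ col < n)
    (i : Int) (hi : 0 ≤ i) (f : Nat → Nat → Bool) :
    stepA n row col (Gr n.toNat f) i
      = Gr n.toNat (fun a b => f a b && !(hitb row col i a b)) := by
  have hN : ((n.toNat : Int)) = n := by omega
  simp only [stepA]
  rw [condSet_Gr (N := n.toNat) (P := row + i < n ∧ col + i < n)
      (r := row + i) (c := col + i) (h := fun hp => by omega)]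
  rw [condSet_Gr (N := n.toNat) (P := row - i ≥ 0 ∧ col - i ≥ 0)
      (r := row - i) (c := col - i) (h := fun hp => by omega)]
  rw [condSet_Gr (N := n.toNat) (P := row + i < n ∧ col - i ≥ 0)
      (r := row + i) (c := col - i) (h := fun hp => by omega)]
  rw [condSet_Gr (N := n.toNat) (P := row - i ≥ 0 ∧ col + i < n)
      (r := row - i) (c := col + i) (h := fun hp => by omega)]
  apply Gr_congr
  intro a b ha hb
  have ha' : (a : Int) < n := by omega
  have hb' : (b : Int) < n := by omega
  split_ifs <;>
    first
      | (have hq : hitb row col i a b = true := by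
            simp only [hitb, decide_eq_true_eq]; omega
         simp [hq])
      | (have hq : hitb row col i a b = false := by
            simp only [hitb, decide_eq_false_iff_not]; omega
         simp [hq])

theorem foldA_Gr (n row col : Int) (hn : 0 < n) (hr : 0 ≤ row ∧ row < n) (hc : 0 ≤ col ∧ col < n)
    (l : List Int) (hl : ∀ i ∈ l, 0 ≤ i) (f : Nat → Nat → Bool) :
    l.foldl (stepA n row col) (Gr n.toNat f)
      = Gr n.toNat (fun a b => f a b && l.all (fun i => !(hitb row col i a b))) := by
  induction l generalizing f with
  | nil => simp [Gr]
  | cons i l ih =>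
    simp only [List.foldl_cons]
    rw [stepA_Gr n row col hn hr hc i (hl i (by simp)) f]
    rw [ih (fun j hj => hl j (by simp [hj])) _]
    apply Gr_congr
    intro a b _ _
    simp [Bool.and_assoc]

theorem hit_iff (n row col : Int) (_hn : 0 < n) (_hr : 0 ≤ row ∧ row < n) (hc : 0 ≤ col ∧ col < n)
    (a b : Nat) (_ha : (a : Int) < n) (hb : (b : Int) < n) :
    (∃ i : Int, 0 ≤ i ∧ i < n ∧ hitb row col i a b = true)
      ↔ ((a : Int) - row).natAbs = ((b : Int) - col).natAbs := by
  constructor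
  · rintro ⟨i, h0, h1, h2⟩
    simp only [hitb, decide_eq_true_eq] at h2
    omega
  · intro h
    refine ⟨(((a : Int) - row).natAbs : Int), by omega, by omega, ?_⟩
    simp only [hitb, decide_eq_true_eq]
    omega

-- ===== VERDICT (by name: the statement is the Claim_ definition above) =====
theorem find_invalid_spaces_spec : Claim_equal_find_invalid_spaces := by
  intro n row col _hdom hpre
  unfold Spec_find_invalid_spaces find_invalid_spaces find_invalid_spaces_alt
  rcases hpre with hle | ⟨hr0, hrn, hc0, hcn⟩
  · rw [PySem.List.pyRange_one_eq_nil (by omega)]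
    simp
  · have hn : 0 < n := by omega
    have hrange : PySem.List.pyRange 0 n 1 = (List.range n.toNat).map (fun k : Nat => (k : Int)) := by
      rw [PySem.List.pyRange_one]
      simp
    have hinit : (PySem.List.pyRange 0 n 1).map (fun _ => List.replicate n.toNat true)
        = Gr n.toNat (fun _ _ => true) := by
      rw [hrange]
      simp [Gr, Function.comp_def, List.map_const']
    have hB : (PySem.List.pyRange 0 n 1).map (fun i =>
          (PySem.List.pyRange 0 n 1).map (fun j => (i - row).natAbs != (j - col).natAbs))
        = Gr n.toNat (fun a b => ((a : Int) - row).natAbs != ((b : Int) - col).natAbs) := by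
      rw [hrange]
      apply List.ext_getElem (by simp [Gr])
      intro a h1 h2
      simp only [Gr, List.getElem_map, List.getElem_range]
      simp [List.map_map, Function.comp_def]
    have hfold : (PySem.List.pyRange 0 n 1).foldl (fun g i =>
        let g := if row + i < n ∧ col + i < n then gridSet g (row + i) (col + i) false else g
        let g := if row - i ≥ 0 ∧ col - i ≥ 0 then gridSet g (row - i) (col - i) false else g
        let g := if row + i < n ∧ col - i ≥ 0 then gridSet g (row + i) (col - i) false else g
        let g := if row - i ≥ 0 ∧ col + i < n then gridSet g (row - i) (col + i) false else g
        g) (Gr n.toNat (fun _ _ => true))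
        = (PySem.List.pyRange 0 n 1).foldl (stepA n row col) (Gr n.toNat (fun _ _ => true)) := rfl
    rw [hinit, hfold, hB]
    rw [foldA_Gr n row col hn ⟨hr0, hrn⟩ ⟨hc0, hcn⟩ _
        (fun i hi => ((PySem.List.mem_pyRange_one).1 hi).1) _]
    apply Gr_congr
    intro a b haN hbN
    have key := hit_iff n row col hn ⟨hr0, hrn⟩ ⟨hc0, hcn⟩ a b (by omega) (by omega)
    rw [Bool.eq_iff_iff]
    simp only [Bool.true_and, List.all_eq_true, PySem.List.mem_pyRange_one,
      Bool.not_eq_eq_eq_not, Bool.not_true, bne_iff_ne, ne_eq]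
    constructor
    · intro hall heq
      obtain ⟨i, hi0, hi1, hi2⟩ := key.2 heq
      have := hall i ⟨hi0, hi1⟩
      simp [hi2] at this
    · intro hne i hi
      rcases Bool.eq_false_or_eq_true (hitb row col i a b) with ht | hf
      · exact absurd (key.1 ⟨i, hi.1, hi.2, ht⟩) hne
      · simp [hf]
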